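-- pv_equiv track=rewrite | github.com/skymaurya/study_hall_management | app.py | get_selectable_payment_months
-- ===== SOURCE A (Python) =====
-- def build_month_states(due_months, paid_months):
--     states = {}
--     gap_found = False
--
--     for month in due_months:
--         if month in paid_months and not gap_found:
--             states[month] = "paid"
--         elif month in paid_months and gap_found:
--             states[month] = "advance_paid"
--         else:
--             states[month] = "unpaid"
--             gap_found = True
--
--     return states
--
-- def get_selectable_payment_months(due_months, paid_months):
--     states = build_month_states(due_months, paid_months)
--     selectable = []
--     first_unpaid_found = False
--
--     for month in due_months:
--         state = states[month]
--         if state == "unpaid":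
--             selectable.append(month)
--             first_unpaid_found = True
--         elif first_unpaid_found:
--             break
--
--     return selectable, states
-- ===== SOURCE B (Python) =====
-- def get_selectable_payment_months(due_months, paid_months):
--     paid = set(paid_months)
--     # pivot = index of first due month not yet paid (len if all paid)
--     pivot = next((i for i, m in enumerate(due_months) if m not in paid),
--                  len(due_months))
--     states = {}
--     for i, m in enumerate(due_months):
--         states[m] = ("unpaid" if m not in paid
--                      else "paid" if i < pivot else "advance_paid")
--     selectable = []
--     for m in due_months[pivot:]:
--         if m in paid:
--             break
--         selectable.append(m)
--     return selectable, states
-- ===== Notes on version B (the rewrite author's own statement) =====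
-- stated objective: faster
-- what changed: Replaces A's mutable gap_found flag, O(m) list membership tests and second dict-lookup pass by a set of paid_months, a precomputed pivot (index of the first unpaid due month), index-vs-pivot classification, and selectable as the contiguous unpaid run sliced from the pivot.
import Mathlib
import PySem

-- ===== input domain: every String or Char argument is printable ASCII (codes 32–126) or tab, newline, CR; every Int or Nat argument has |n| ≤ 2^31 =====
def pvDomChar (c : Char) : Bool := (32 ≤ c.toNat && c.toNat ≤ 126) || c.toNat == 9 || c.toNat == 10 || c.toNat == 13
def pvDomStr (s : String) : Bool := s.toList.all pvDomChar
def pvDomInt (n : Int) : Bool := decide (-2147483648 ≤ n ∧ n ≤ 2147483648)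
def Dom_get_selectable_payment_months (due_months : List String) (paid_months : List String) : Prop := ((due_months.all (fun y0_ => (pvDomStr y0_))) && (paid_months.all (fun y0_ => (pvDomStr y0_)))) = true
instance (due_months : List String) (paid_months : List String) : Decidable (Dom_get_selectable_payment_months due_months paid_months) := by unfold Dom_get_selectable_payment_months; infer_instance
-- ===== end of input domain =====

-- B replaces A's mutable gap_found flag and second dict-lookup pass by a precomputed pivot index,
-- index-vs-pivot classification and a takeWhile on the slice from the pivot (faster: set membership + one pass instead of repeated list scans).

-- ===== PORT A =====
-- build_month_states: loop over due_months carrying (states, gap_found)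
def pvBuildA (paid_months : List String) : List String → PySem.Dict String String → Bool → PySem.Dict String String
  | [], states, _ => states
  | month :: rest, states, gap =>
    if paid_months.contains month && !gap then
      pvBuildA paid_months rest (states.insert month "paid") gap
    else if paid_months.contains month && gap then
      pvBuildA paid_months rest (states.insert month "advance_paid") gap
    else
      pvBuildA paid_months rest (states.insert month "unpaid") true

-- the selectable loop with its first_unpaid_found flag and break; states[month] never misses
-- a key here (every month of due_months was inserted), so getD "" is exact.
def pvSelA (states : PySem.Dict String String) : List String → Bool → List String
  | [], _ => []
  | month :: rest, found =>
    if states.getD month "" = "unpaid" then month :: pvSelA states rest true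
    else if found then [] else pvSelA states rest found

def get_selectable_payment_months (due_months : List String) (paid_months : List String) : List String × (List (String × String)) :=
  let states := pvBuildA paid_months due_months PySem.Dict.empty false
  (pvSelA states due_months false, states.items)

-- ===== PORT B =====
def get_selectable_payment_months_alt (due_months : List String) (paid_months : List String) : List String × (List (String × String)) :=
  let paid : PySem.Set String := PySem.Set.ofList paid_months
  -- pivot = next((i for i, m in enumerate(due_months) if m not in paid), len(due_months))
  let pivot : Int := (due_months.findIdx (fun m => !(PySem.Set.contains paid m)) : Nat)
  let states := (PySem.List.enumerate due_months).foldl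
    (fun d p => d.insert p.2
      (if !(PySem.Set.contains paid p.2) then "unpaid"
       else if p.1 < pivot then "paid" else "advance_paid"))
    PySem.Dict.empty
  -- for m in due_months[pivot:]: if m in paid: break; selectable.append(m)
  let selectable := (PySem.List.slice due_months (some pivot) none).takeWhile
    (fun m => !(PySem.Set.contains paid m))
  (selectable, states.items)

-- ===== PRECONDITION & SPEC =====
def Spec_get_selectable_payment_months (due_months : List String) (paid_months : List String) (out : List String × (List (String × String))) : Prop := out = get_selectable_payment_months_alt due_months paid_months
instance (due_months : List String) (paid_months : List String) (out : List String × (List (String × String))) : Decidable (Spec_get_selectable_payment_months due_months paid_months out) := by unfold Spec_get_selectable_payment_months; infer_instance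

-- ===== CLAIM (what is proved, stated in full; the proofs are below) =====
def Claim_equal_get_selectable_payment_months : Prop := ∀ (due_months : List String) (paid_months : List String), Dom_get_selectable_payment_months due_months paid_months → Spec_get_selectable_payment_months due_months paid_months (get_selectable_payment_months due_months paid_months)

-- ===== LEMMAS AND PROOFS =====

theorem set_contains_ofList (paid_months : List String) (m : String) :
    PySem.Set.contains (PySem.Set.ofList paid_months) m = paid_months.contains m := by
  rw [Bool.eq_iff_iff]
  simp [PySem.Set.mem_ofList]

theorem build_eq (paid_months : List String) :
    ∀ (l : List String) (d : PySem.Dict String String) (g : Bool) (s : Int) (pivot : Int),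
      (g = false → pivot = s + (l.findIdx (fun m => !(paid_months.contains m)) : Nat)) →
      (g = true → pivot < s) →
      pvBuildA paid_months l d g =
        (PySem.List.enumerate l s).foldl
          (fun d p => d.insert p.2
            (if !(paid_months.contains p.2) then "unpaid"
             else if p.1 < pivot then "paid" else "advance_paid")) d := by
  intro l
  induction l with
  | nil => intro d g s pivot _ _; simp [pvBuildA, PySem.List.enumerate_nil]
  | cons m rest ih =>
    intro d g s pivot h0 h1
    rw [PySem.List.enumerate_cons, List.foldl_cons]
    by_cases hp : paid_months.contains m = true
    · cases g with
      | false =>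
        have hpv := h0 rfl
        rw [List.findIdx_cons] at hpv
        simp only [hp, Bool.not_true, cond_false] at hpv
        have hlt : s < pivot := by push_cast at hpv ⊢; omega
        simp only [pvBuildA, hp, Bool.not_false, Bool.and_true, if_true, Bool.not_true,
          Bool.false_eq_true, if_false, if_pos hlt]
        exact ih _ false (s+1) pivot (fun _ => by push_cast at hpv ⊢; omega)
          (fun h => by exact absurd h (by simp))
      | true =>
        have hlt := h1 rfl
        simp only [pvBuildA, hp, Bool.not_true, Bool.and_false, Bool.false_eq_true, if_false,
          Bool.and_true, if_true, if_neg (by omega : ¬ s < pivot)]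
        exact ih _ true (s+1) pivot (fun h => by exact absurd h (by simp)) (fun _ => by omega)
    · simp only [Bool.not_eq_true] at hp
      have hnext : pivot < s + 1 := by
        cases g with
        | true => have := h1 rfl; omega
        | false =>
          have := h0 rfl
          rw [List.findIdx_cons] at this
          simp only [hp, Bool.not_false, cond_true, Nat.cast_zero] at this
          omega
      simp only [pvBuildA, hp, Bool.false_and, Bool.false_eq_true, if_false]
      exact ih _ true (s+1) pivot (fun h => by exact absurd h (by simp)) (fun _ => hnext)

theorem buildA_unpaid (paid_months : List String) :
    ∀ (l : List String) (d : PySem.Dict String String) (g : Bool) (m : String),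
      (m ∈ l ∨ (d.get? m).isSome) →
      (∀ v, d.get? m = some v → ((v = "unpaid") ↔ paid_months.contains m = false)) →
      ∃ v, (pvBuildA paid_months l d g).get? m = some v ∧
        ((v = "unpaid") ↔ paid_months.contains m = false) := by
  intro l
  induction l with
  | nil =>
    intro d g m hmem hval
    rcases hmem with h | h
    · cases h
    · obtain ⟨v, hv⟩ := Option.isSome_iff_exists.mp h
      exact ⟨v, by simpa [pvBuildA] using hv, hval v hv⟩
  | cons a rest ih =>
    intro d g m hmem hval
    have step : ∀ (w : String) (g' : Bool),
        ((w = "unpaid") ↔ paid_months.contains a = false) →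
        ∃ v, (pvBuildA paid_months rest (d.insert a w) g').get? m = some v ∧
          ((v = "unpaid") ↔ paid_months.contains m = false) := by
      intro w g' hw
      apply ih
      · by_cases he : m = a
        · right; subst he; simp [PySem.Dict.get?_insert_self]
        · rcases hmem with h | h
          · rcases List.mem_cons.mp h with h' | h'
            · exact absurd h' he
            · exact Or.inl h'
          · right; rwa [PySem.Dict.get?_insert_of_ne _ _ he]
      · intro v hv
        by_cases he : m = a
        · subst he
          rw [PySem.Dict.get?_insert_self] at hv
          cases hv; exact hw
        · rw [PySem.Dict.get?_insert_of_ne _ _ he] at hv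
          exact hval v hv
    by_cases hp : paid_months.contains a = true
    · cases g with
      | false =>
        simp only [pvBuildA, hp, Bool.not_false, Bool.and_true, if_true]
        exact step "paid" false (iff_of_false (by decide) (by rw [hp]; decide))
      | true =>
        simp only [pvBuildA, hp, Bool.not_true, Bool.and_false, Bool.false_eq_true, if_false,
          Bool.and_true, if_true]
        exact step "advance_paid" true (iff_of_false (by decide) (by rw [hp]; decide))
    · simp only [Bool.not_eq_true] at hp
      simp only [pvBuildA, hp, Bool.false_and, Bool.false_eq_true, if_false]
      exact step "unpaid" true (iff_of_true rfl hp)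

theorem selA_true (paid_months : List String) (states : PySem.Dict String String) :
    ∀ (l : List String),
      (∀ m ∈ l, (states.getD m "" = "unpaid") ↔ paid_months.contains m = false) →
      pvSelA states l true = l.takeWhile (fun m => !(paid_months.contains m)) := by
  intro l
  induction l with
  | nil => intro _; rfl
  | cons a rest ih =>
    intro h
    have ha := h a (List.mem_cons_self ..)
    rw [List.takeWhile_cons]
    by_cases hp : paid_months.contains a = true
    · have hne : ¬ (states.getD a "" = "unpaid") := fun hc => by
        have := ha.mp hc; rw [hp] at this; cases this
      simp only [pvSelA, if_neg hne, if_pos trivial, hp, Bool.not_true, Bool.false_eq_true, if_false]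
    · simp only [Bool.not_eq_true] at hp
      simp only [pvSelA, if_pos (ha.mpr hp), hp, Bool.not_false, if_true]
      exact congrArg _ (ih (fun m hm => h m (List.mem_cons_of_mem _ hm)))

theorem selA_false (paid_months : List String) (states : PySem.Dict String String) :
    ∀ (l : List String),
      (∀ m ∈ l, (states.getD m "" = "unpaid") ↔ paid_months.contains m = false) →
      pvSelA states l false =
        (l.drop (l.findIdx (fun m => !(paid_months.contains m)))).takeWhile
          (fun m => !(paid_months.contains m)) := by
  intro l
  induction l with
  | nil => intro _; rfl
  | cons a rest ih =>
    intro h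
    have ha := h a (List.mem_cons_self ..)
    rw [List.findIdx_cons]
    by_cases hp : paid_months.contains a = true
    · simp only [hp, Bool.not_true, cond_false, List.drop_succ_cons]
      have hne : ¬ (states.getD a "" = "unpaid") := fun hc => by
        have := ha.mp hc; rw [hp] at this; cases this
      simp only [pvSelA, if_neg hne, Bool.false_eq_true, if_false]
      exact ih (fun m hm => h m (List.mem_cons_of_mem _ hm))
    · simp only [Bool.not_eq_true] at hp
      simp only [hp, Bool.not_false, cond_true, List.drop_zero, List.takeWhile_cons,
        Bool.not_false, if_true]
      simp only [pvSelA, if_pos (ha.mpr hp)]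
      exact congrArg _ (selA_true paid_months states rest
        (fun m hm => h m (List.mem_cons_of_mem _ hm)))

-- ===== VERDICT (by name: the statement is the Claim_ definition above) =====
theorem get_selectable_payment_months_spec : Claim_equal_get_selectable_payment_months := by
  intro due paid _
  unfold Spec_get_selectable_payment_months
  unfold get_selectable_payment_months get_selectable_payment_months_alt
  simp only [set_contains_ofList]
  have hd : pvBuildA paid due PySem.Dict.empty false =
      (PySem.List.enumerate due).foldl
        (fun d p => d.insert p.2
          (if !(paid.contains p.2) then "unpaid"
           else if p.1 < ((due.findIdx (fun m => !(paid.contains m)) : Nat) : Int)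
           then "paid" else "advance_paid"))
        PySem.Dict.empty :=
    build_eq paid due PySem.Dict.empty false 0 _ (fun _ => (zero_add _).symm) (by simp)
  have hH : ∀ m ∈ due,
      ((pvBuildA paid due PySem.Dict.empty false).getD m "" = "unpaid") ↔
        paid.contains m = false := by
    intro m hm
    obtain ⟨v, hv, hiff⟩ := buildA_unpaid paid due PySem.Dict.empty false m (Or.inl hm)
      (by intro v hv; simp [PySem.Dict.empty, PySem.Dict.get?] at hv)
    rw [PySem.Dict.getD_eq_get?_getD, hv]
    simpa using hiff
  rw [PySem.List.slice_from_natCast]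
  rw [hd, selA_false paid _ due (hd ▸ hH)]
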